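-- pv_equiv track=rewrite | github.com/joestacey/NLI_with_a_human_touch | create_attention_weights.py | combine_special_tokens
-- ===== SOURCE A (Python) =====
-- def combine_special_tokens(
--
--         token_list: list) -> list:
--     """
--     Combines [ sep ] and [ cls ] to be [SEP] and [CLS] in token list
--
--     Args:
--         token_list: list of words with punctuation also split out
--
--     Returns:
--         token_list: list of words with special tokens reassembled
--     """
--
--     ind_list = [idx for idx in range(len(token_list)) \
--             if (token_list[idx] == 'cls' or  token_list[idx] == 'sep')]
--
--     ind_list_remove = []
--     for i in ind_list:
--         ind_list_remove.append(i+1)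
--         ind_list_remove.append(i-1)
--
--     token_list = [token_list[idx] for idx in range(len(token_list)) \
--             if idx not in ind_list_remove]
--
--     token_list = [x if x != 'sep' else '[SEP]' for x in token_list]
--     token_list = [x if x != 'cls' else '[CLS]' for x in token_list]
--
--     return token_list
-- ===== SOURCE B (Python) =====
-- def combine_special_tokens(token_list: list) -> list:
--     out = []
--     n = len(token_list)
--     for idx in range(n):
--         prev_special = idx > 0 and token_list[idx - 1] in ('cls', 'sep')
--         next_special = idx + 1 < n and token_list[idx + 1] in ('cls', 'sep')
--         if prev_special or next_special:
--             continue
--         tok = token_list[idx]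
--         if tok == 'sep':
--             out.append('[SEP]')
--         elif tok == 'cls':
--             out.append('[CLS]')
--         else:
--             out.append(tok)
--     return out
-- ===== Notes on version B (the rewrite author's own statement) =====
-- stated objective: simpler
-- what changed: Replaces A's four passes (build index list of special tokens, build a neighbour-removal index list, filter by membership in it, then two replacement passes) with a single loop over the indices that checks the two neighbours inline and translates 'sep'/'cls' inline.
import Mathlib
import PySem

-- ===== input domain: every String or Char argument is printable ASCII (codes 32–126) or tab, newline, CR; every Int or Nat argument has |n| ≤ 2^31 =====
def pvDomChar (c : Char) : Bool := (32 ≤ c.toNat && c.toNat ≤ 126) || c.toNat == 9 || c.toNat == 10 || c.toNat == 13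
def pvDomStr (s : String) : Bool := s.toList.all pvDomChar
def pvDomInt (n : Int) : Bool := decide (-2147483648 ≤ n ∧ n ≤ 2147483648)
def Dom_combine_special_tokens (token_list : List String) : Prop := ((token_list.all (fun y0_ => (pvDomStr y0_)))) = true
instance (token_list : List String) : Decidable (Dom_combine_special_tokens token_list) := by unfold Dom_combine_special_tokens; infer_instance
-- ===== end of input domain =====

-- B replaces A's four passes (index list, neighbour-removal list, filtering pass, two
-- replacement passes) by ONE loop over the indices with an inline neighbour check and
-- inline token translation — objective: simpler.

-- ===== PORT A =====
def combine_special_tokens (token_list : List String) : List String :=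
  let ind_list : List Nat := (List.range token_list.length).filter
      (fun idx => token_list.getD idx "" == "cls" || token_list.getD idx "" == "sep")
  let ind_list_remove : List Int :=
      ind_list.foldl (fun acc (i : Nat) => (acc ++ [(i : Int) + 1]) ++ [(i : Int) - 1]) []
  let token_list2 : List String := ((List.range token_list.length).filter
      (fun (idx : Nat) => !ind_list_remove.contains ((idx : Int)))).map (fun idx => token_list.getD idx "")
  let token_list3 : List String := token_list2.map (fun x => if x != "sep" then x else "[SEP]")
  token_list3.map (fun x => if x != "cls" then x else "[CLS]")

-- ===== PORT B =====
def combine_special_tokens_alt (token_list : List String) : List String :=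
  (List.range token_list.length).foldl (fun out idx =>
    let prev_special := decide (0 < idx) &&
      (token_list.getD (idx - 1) "" == "cls" || token_list.getD (idx - 1) "" == "sep")
    let next_special := decide (idx + 1 < token_list.length) &&
      (token_list.getD (idx + 1) "" == "cls" || token_list.getD (idx + 1) "" == "sep")
    if prev_special || next_special then out
    else
      let tok := token_list.getD idx ""
      out ++ [if tok == "sep" then "[SEP]" else if tok == "cls" then "[CLS]" else tok]) []

-- ===== PRECONDITION & SPEC =====
def Spec_combine_special_tokens (token_list : List String) (out : List String) : Prop := out = combine_special_tokens_alt token_list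
instance (token_list : List String) (out : List String) : Decidable (Spec_combine_special_tokens token_list out) := by unfold Spec_combine_special_tokens; infer_instance

-- ===== CLAIM (what is proved, stated in full; the proofs are below) =====
def Claim_equal_combine_special_tokens : Prop := ∀ (token_list : List String), Dom_combine_special_tokens token_list → Spec_combine_special_tokens token_list (combine_special_tokens token_list)

-- ===== LEMMAS AND PROOFS =====

-- tl[i] is a special token
def pvSpecial (tl : List String) (i : Nat) : Bool :=
  tl.getD i "" == "cls" || tl.getD i "" == "sep"

-- B keeps index idx iff no neighbour is special
def pvKeep (tl : List String) (idx : Nat) : Bool :=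
  !((decide (0 < idx) && pvSpecial tl (idx - 1)) ||
    (decide (idx + 1 < tl.length) && pvSpecial tl (idx + 1)))

def pvXlate (x : String) : String :=
  if x == "sep" then "[SEP]" else if x == "cls" then "[CLS]" else x

lemma alt_eq (tl : List String) :
    combine_special_tokens_alt tl =
      ((List.range tl.length).filter (pvKeep tl)).map (fun idx => pvXlate (tl.getD idx "")) := by
  show (List.range tl.length).foldl (fun out idx =>
      if (decide (0 < idx) && (tl.getD (idx - 1) "" == "cls" || tl.getD (idx - 1) "" == "sep")) ||
         (decide (idx + 1 < tl.length) && (tl.getD (idx + 1) "" == "cls" || tl.getD (idx + 1) "" == "sep")) then out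
      else out ++ [if tl.getD idx "" == "sep" then "[SEP]"
                   else if tl.getD idx "" == "cls" then "[CLS]" else tl.getD idx ""]) [] = _
  have hf : (fun (out : List String) (idx : Nat) =>
      if (decide (0 < idx) && (tl.getD (idx - 1) "" == "cls" || tl.getD (idx - 1) "" == "sep")) ||
         (decide (idx + 1 < tl.length) && (tl.getD (idx + 1) "" == "cls" || tl.getD (idx + 1) "" == "sep")) then out
      else out ++ [if tl.getD idx "" == "sep" then "[SEP]"
                   else if tl.getD idx "" == "cls" then "[CLS]" else tl.getD idx ""])
      = fun out idx => if pvKeep tl idx then out ++ [pvXlate (tl.getD idx "")] else out := by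
    funext out idx
    simp only [pvKeep, pvSpecial, pvXlate, Bool.not_eq_eq_eq_not, Bool.not_true]
    cases hb : ((decide (0 < idx) && (tl.getD (idx - 1) "" == "cls" || tl.getD (idx - 1) "" == "sep")) ||
        (decide (idx + 1 < tl.length) && (tl.getD (idx + 1) "" == "cls" || tl.getD (idx + 1) "" == "sep"))) <;>
      simp
  rw [hf, PySem.List.foldl_append_if]
  simp

-- membership in A's removal list
lemma mem_remove (tl : List String) (k : Int) :
    (k ∈ ((List.range tl.length).filter
        (fun idx => tl.getD idx "" == "cls" || tl.getD idx "" == "sep")).foldl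
        (fun acc (i : Nat) => (acc ++ [(i : Int) + 1]) ++ [(i : Int) - 1]) []) ↔
      ∃ i : Nat, i < tl.length ∧ pvSpecial tl i ∧ (k = (i : Int) + 1 ∨ k = (i : Int) - 1) := by
  rw [show (fun (acc : List Int) (i : Nat) => (acc ++ [(i : Int) + 1]) ++ [(i : Int) - 1]) =
      (fun acc (i : Nat) => acc ++ [(i : Int) + 1, (i : Int) - 1]) from by funext acc i; simp]
  rw [PySem.List.foldl_append_eq_flatMap]
  simp only [List.nil_append, List.mem_flatMap, List.mem_filter, List.mem_range, List.mem_cons,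
    List.not_mem_nil, or_false, pvSpecial]
  constructor
  · rintro ⟨i, ⟨hi, hs⟩, h⟩
    exact ⟨i, hi, hs, h⟩
  · rintro ⟨i, hi, hs, h⟩
    exact ⟨i, ⟨hi, hs⟩, h⟩

-- A keeps exactly the indices B keeps
lemma keep_eq (tl : List String) (idx : Nat) (hidx : idx < tl.length) :
    (!((((List.range tl.length).filter
        (fun i => tl.getD i "" == "cls" || tl.getD i "" == "sep")).foldl
        (fun acc (i : Nat) => (acc ++ [(i : Int) + 1]) ++ [(i : Int) - 1]) []).contains ((idx : Int))))
      = pvKeep tl idx := by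
  have key : (((idx : Int)) ∈ ((List.range tl.length).filter
        (fun i => tl.getD i "" == "cls" || tl.getD i "" == "sep")).foldl
        (fun acc (i : Nat) => (acc ++ [(i : Int) + 1]) ++ [(i : Int) - 1]) []) ↔
      ((0 < idx ∧ pvSpecial tl (idx - 1)) ∨ (idx + 1 < tl.length ∧ pvSpecial tl (idx + 1))) := by
    rw [mem_remove]
    constructor
    · rintro ⟨i, hi, hs, hk | hk⟩
      · left
        refine ⟨by omega, ?_⟩
        rwa [show idx - 1 = i from by omega]
      · right
        refine ⟨by omega, ?_⟩
        rwa [show idx + 1 = i from by omega]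
    · rintro (⟨h0, hs⟩ | ⟨h1, hs⟩)
      · exact ⟨idx - 1, by omega, hs, Or.inl (by omega)⟩
      · exact ⟨idx + 1, by omega, hs, Or.inr (by omega)⟩
  have hc : (((List.range tl.length).filter
        (fun i => tl.getD i "" == "cls" || tl.getD i "" == "sep")).foldl
        (fun acc (i : Nat) => (acc ++ [(i : Int) + 1]) ++ [(i : Int) - 1]) []).contains ((idx : Int))
      = ((decide (0 < idx) && pvSpecial tl (idx - 1)) ||
         (decide (idx + 1 < tl.length) && pvSpecial tl (idx + 1))) := by
    rw [Bool.eq_iff_iff]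
    simp only [List.contains_iff_mem, key, Bool.or_eq_true, Bool.and_eq_true, decide_eq_true_eq]
  rw [hc]
  rfl

-- the two replacement passes of A compose to B's translation
lemma xlate_eq (x : String) :
    (if (if x != "sep" then x else "[SEP]") != "cls" then (if x != "sep" then x else "[SEP]")
     else "[CLS]") = pvXlate x := by
  unfold pvXlate
  by_cases hs : x == "sep"
  · have : x = "sep" := by simpa using hs
    subst this; decide
  · by_cases hc : x == "cls"
    · have : x = "cls" := by simpa using hc
      subst this; decide
    · simp [hs, hc, bne]

-- ===== VERDICT (by name: the statement is the Claim_ definition above) =====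
theorem combine_special_tokens_spec : Claim_equal_combine_special_tokens := by
  intro tl _
  show combine_special_tokens tl = combine_special_tokens_alt tl
  rw [alt_eq]
  unfold combine_special_tokens
  simp only [List.map_map]
  rw [List.filter_congr (fun idx h => keep_eq tl idx (List.mem_range.mp h))]
  exact List.map_congr_left (fun idx _ => xlate_eq _)
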